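-- pv_equiv track=rewrite | github.com/mholgatem/FiniteStateMachine | grade_fsm.py | expand_input_combos_for_dictionary
-- ===== SOURCE A (Python) =====
-- from typing import Dict, Iterable, List, Mapping, MutableMapping, Optional, Tuple
--
-- def normalize_binary_value(val: Optional[str]) -> str:
--     """Normalize binary characters, preserving ``X`` for don't-care."""
--
--     if val is None:
--         return ""
--     normalized = str(val).upper().strip()
--     for char in normalized:
--         if char in {"0", "1", "X"}:
--             return char
--     return ""
--
-- def expand_input_combos_for_dictionary(bits: List[str]) -> List[str]:
--     """Mirror ``expandInputCombosForDictionary`` from the UI."""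
--
--     combos = [""]
--     for bit in bits:
--         normalized = normalize_binary_value(bit)
--         options = ["0", "1"] if normalized == "X" else [normalized or "-"]
--         next_batch: List[str] = []
--         for prefix in combos:
--             for option in options:
--                 next_batch.append(f"{prefix}{option}")
--         combos = next_batch
--     return combos
-- ===== SOURCE B (Python) =====
-- def normalize_binary_value(val):
--     """Normalize binary characters, preserving ``X`` for don't-care."""
--     if val is None:
--         return ""
--     normalized = str(val).upper().strip()
--     for char in normalized:
--         if char in {"0", "1", "X"}:
--             return char
--     return ""
--
--
-- def expand_input_combos_for_dictionary(bits):
--     """Build a fixed template once, then enumerate the 2**k substitutions."""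
--     template = []
--     x_positions = []
--     for bit in bits:
--         n = normalize_binary_value(bit)
--         if n == "X":
--             x_positions.append(len(template))
--             template.append("X")
--         else:
--             template.append(n or "-")
--     k = len(x_positions)
--     result = []
--     for i in range(2 ** k):
--         chars = template[:]
--         for j, pos in enumerate(x_positions):
--             chars[pos] = "1" if (i >> (k - 1 - j)) & 1 else "0"
--         result.append("".join(chars))
--     return result
-- ===== Notes on version B (the rewrite author's own statement) =====
-- stated objective: faster
-- what changed: Instead of rebuilding the whole combo list once per bit (repeatedly copying every growing prefix string), B makes one pass to build a fixed template plus the list of X-positions, then constructs each of the 2**k output strings once from the bits of a counter i (leftmost X = most significant bit).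
import Mathlib
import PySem

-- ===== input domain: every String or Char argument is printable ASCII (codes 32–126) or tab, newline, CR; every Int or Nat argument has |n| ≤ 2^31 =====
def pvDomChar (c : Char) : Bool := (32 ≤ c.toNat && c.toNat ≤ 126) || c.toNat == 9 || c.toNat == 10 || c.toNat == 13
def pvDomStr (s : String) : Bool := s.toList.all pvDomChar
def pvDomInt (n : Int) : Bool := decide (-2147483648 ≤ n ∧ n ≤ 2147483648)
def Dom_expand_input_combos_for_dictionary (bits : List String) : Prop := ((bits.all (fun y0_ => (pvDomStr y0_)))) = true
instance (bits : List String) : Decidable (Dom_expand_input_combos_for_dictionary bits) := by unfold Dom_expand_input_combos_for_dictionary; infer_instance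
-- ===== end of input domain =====

-- B builds a template + X-position list in one pass and generates each output string once from the bits of a counter, instead of A's repeated list-doubling that re-copies every prefix at each bit; measured faster.

-- ===== PORT A =====
-- helper: the 'for char in normalized: if char in {...}: return char' loop
def nbvLoop : List Char → String
  | [] => ""
  | c :: rest => if c = '0' ∨ c = '1' ∨ c = 'X' then String.ofList [c] else nbvLoop rest

def normalize_binary_value (val : String) : String :=
  nbvLoop (PySem.Str.strip (PySem.Str.upper val)).toList

def expand_input_combos_for_dictionary (bits : List String) : List String :=
  bits.foldl (fun combos bit =>
    let normalized := normalize_binary_value bit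
    let options := if normalized = "X" then ["0", "1"]
                   else [if normalized = "" then "-" else normalized]
    combos.foldl (fun nb pfx => options.foldl (fun nb2 o => nb2 ++ [pfx ++ o]) nb) []) [""]

-- ===== PORT B =====
-- one pass over bits: the fixed template and the positions of the X's
def altScan (bits : List String) : List String × List Nat :=
  bits.foldl (fun st bit =>
    let n := normalize_binary_value bit
    if n = "X" then (st.1 ++ ["X"], st.2 ++ [st.1.length])
    else (st.1 ++ [if n = "" then "-" else n], st.2)) ([], [])

-- chars[pos] = "1" if (i >> (k-1-j)) & 1 else "0", over enumerate(x_positions)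
def altSub (template : List String) (xpos : List Nat) (k i : Nat) : List String :=
  xpos.zipIdx.foldl (fun cs jp =>
    cs.set jp.1 (if (i >>> (k - 1 - jp.2)) &&& 1 ≠ 0 then "1" else "0")) template

def expand_input_combos_for_dictionary_alt (bits : List String) : List String :=
  (List.range (2 ^ (altScan bits).2.length)).map
    (fun i => String.join (altSub (altScan bits).1 (altScan bits).2 (altScan bits).2.length i))

-- ===== PRECONDITION & SPEC =====
def Spec_expand_input_combos_for_dictionary (bits : List String) (out : List String) : Prop := out = expand_input_combos_for_dictionary_alt bits
instance (bits : List String) (out : List String) : Decidable (Spec_expand_input_combos_for_dictionary bits out) := by unfold Spec_expand_input_combos_for_dictionary; infer_instance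

-- ===== CLAIM (what is proved, stated in full; the proofs are below) =====
def Claim_equal_expand_input_combos_for_dictionary : Prop := ∀ (bits : List String), Dom_expand_input_combos_for_dictionary bits → Spec_expand_input_combos_for_dictionary bits (expand_input_combos_for_dictionary bits)

-- ===== LEMMAS AND PROOFS =====

-- A's inner nested append-loop is a flatMap
theorem astep_eq_flatMap (combos options : List String) (acc : List String) :
    combos.foldl (fun nb pfx => options.foldl (fun nb2 o => nb2 ++ [pfx ++ o]) nb) acc
      = acc ++ combos.flatMap (fun pfx => options.map (fun o => pfx ++ o)) := by
  simp only [PySem.List.foldl_append_singleton_eq_map]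
  exact PySem.List.foldl_append_eq_flatMap _ _ _

theorem expand_snoc (bs : List String) (b : String) :
    expand_input_combos_for_dictionary (bs ++ [b]) =
      (expand_input_combos_for_dictionary bs).flatMap (fun pfx =>
        (if normalize_binary_value b = "X" then ["0", "1"]
         else [if normalize_binary_value b = "" then "-" else normalize_binary_value b]).map
          (fun o => pfx ++ o)) := by
  unfold expand_input_combos_for_dictionary
  rw [List.foldl_append]
  simp only [List.foldl_cons, List.foldl_nil]
  rw [astep_eq_flatMap]
  simp

theorem altScan_snoc (bs : List String) (b : String) :
    altScan (bs ++ [b]) =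
      (if normalize_binary_value b = "X"
       then ((altScan bs).1 ++ ["X"], (altScan bs).2 ++ [(altScan bs).1.length])
       else ((altScan bs).1 ++ [if normalize_binary_value b = "" then "-" else normalize_binary_value b],
             (altScan bs).2)) := by
  unfold altScan
  rw [List.foldl_append]
  simp

theorem foldl_set_length {α β : Type} (l : List β) (f : β → α) (g : β → Nat) (cs : List α) :
    (l.foldl (fun cs jp => cs.set (g jp) (f jp)) cs).length = cs.length := by
  induction l generalizing cs with
  | nil => rfl
  | cons a t ih => simp [List.foldl_cons, ih, List.length_set]

theorem foldl_set_append {α : Type} (l : List (Nat × Nat)) (f : Nat × Nat → α) (cs : List α) (y : α)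
    (h : ∀ jp ∈ l, jp.1 < cs.length) :
    l.foldl (fun cs jp => cs.set jp.1 (f jp)) (cs ++ [y])
      = (l.foldl (fun cs jp => cs.set jp.1 (f jp)) cs) ++ [y] := by
  induction l generalizing cs with
  | nil => rfl
  | cons a t ih =>
    simp only [List.foldl_cons]
    rw [List.set_append, if_pos (h a (by simp))]
    exact ih _ (fun jp hm => by rw [List.length_set]; exact h jp (List.mem_cons_of_mem _ hm))

theorem foldl_set_congr {α : Type} (l : List (Nat × Nat)) (f g : Nat × Nat → α) (cs : List α)
    (h : ∀ jp ∈ l, f jp = g jp) :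
    l.foldl (fun cs jp => cs.set jp.1 (f jp)) cs = l.foldl (fun cs jp => cs.set jp.1 (g jp)) cs := by
  induction l generalizing cs with
  | nil => rfl
  | cons a t ih =>
    simp only [List.foldl_cons]
    rw [h a (by simp)]
    exact ih _ (fun jp hm => h jp (by simp [hm]))

theorem altScan_inv (bits : List String) :
    ∀ p ∈ (altScan bits).2, p < (altScan bits).1.length := by
  induction bits using List.reverseRecOn with
  | nil => simp [altScan]
  | append_singleton bs b ih =>
    rw [altScan_snoc]
    by_cases hx : normalize_binary_value b = "X"
    · rw [if_pos hx]
      intro p hp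
      simp only [List.mem_append, List.mem_singleton] at hp
      rcases hp with hp | hp
      · have := ih p hp; simp; omega
      · subst hp; simp
    · rw [if_neg hx]
      intro p hp
      have := ih p hp; simp; omega

theorem altSub_fixed (T : List String) (P : List Nat) (k i : Nat) (c : String)
    (hP : ∀ p ∈ P, p < T.length) :
    altSub (T ++ [c]) P k i = altSub T P k i ++ [c] := by
  unfold altSub
  apply foldl_set_append
  intro jp hm
  have h := List.mem_zipIdx hm
  have : jp.1 ∈ P := by
    obtain ⟨_, h2, h3⟩ := h
    have : jp.1 = P[jp.2 - 0] := h3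
    rw [this]; exact List.getElem_mem _
  exact hP _ this

theorem shift_double (i k j : Nat) (hj : j < k) :
    (i >>> (k - j)) &&& 1 = ((i >>> 1) >>> (k - 1 - j)) &&& 1 := by
  rw [← Nat.shiftRight_add]
  congr 2
  omega

theorem altSub_X (T : List String) (P : List Nat) (i : Nat)
    (hP : ∀ p ∈ P, p < T.length) :
    altSub (T ++ ["X"]) (P ++ [T.length]) (P.length + 1) i
      = altSub T P P.length (i >>> 1) ++ [if i &&& 1 ≠ 0 then "1" else "0"] := by
  unfold altSub
  rw [List.zipIdx_append, List.foldl_append]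
  simp only [List.zipIdx_cons, List.zipIdx_nil, List.foldl_cons, List.foldl_nil, Nat.zero_add]
  have hcong : List.foldl
      (fun cs jp => cs.set jp.1 (if i >>> (P.length + 1 - 1 - jp.2) &&& 1 ≠ 0 then "1" else "0"))
      (T ++ ["X"]) P.zipIdx
      = List.foldl
      (fun cs jp => cs.set jp.1 (if (i >>> 1) >>> (P.length - 1 - jp.2) &&& 1 ≠ 0 then "1" else "0"))
      (T ++ ["X"]) P.zipIdx := by
    apply foldl_set_congr
    intro jp hm
    obtain ⟨_, h2, _⟩ := List.mem_zipIdx hm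
    have hj : jp.2 < P.length := by omega
    have : P.length + 1 - 1 - jp.2 = P.length - jp.2 := by omega
    rw [this, shift_double i P.length jp.2 hj]
  rw [hcong]
  have hmem : ∀ jp ∈ P.zipIdx, jp.1 < T.length := by
    intro jp hm
    obtain ⟨_, h2, h3⟩ := List.mem_zipIdx hm
    have : jp.1 = P[jp.2 - 0] := h3
    rw [this]; exact hP _ (List.getElem_mem _)
  rw [foldl_set_append _ _ _ _ hmem]
  rw [List.set_append]
  rw [if_neg (by rw [foldl_set_length]; omega)]
  have hlen : (List.foldl
      (fun cs jp => cs.set jp.1 (if (i >>> 1) >>> (P.length - 1 - jp.2) &&& 1 ≠ 0 then "1" else "0"))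
      T P.zipIdx).length = T.length := foldl_set_length _ _ _ _
  rw [hlen]
  simp

theorem flatMap_single {α β : Type} (l : List α) (f : α → β) :
    l.flatMap (fun a => [f a]) = l.map f := by
  induction l with
  | nil => rfl
  | cons a t ih => simp [ih]

theorem join_snoc (l : List String) (s : String) :
    String.join (l ++ [s]) = String.join l ++ s := by
  simp [String.join]

theorem range_double_map {α : Type} (n : Nat) (f : Nat → α) :
    (List.range (2 * n)).map f = (List.range n).flatMap (fun q => [f (2 * q), f (2 * q + 1)]) := by
  induction n with
  | zero => rfl
  | succ m ih =>
    have h : 2 * (m + 1) = (2 * m + 1) + 1 := by ring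
    rw [h, List.range_succ, List.range_succ, List.range_succ]
    simp [ih]

theorem expand_eq_alt (bits : List String) :
    expand_input_combos_for_dictionary bits = expand_input_combos_for_dictionary_alt bits := by
  induction bits using List.reverseRecOn with
  | nil => rfl
  | append_singleton bs b ih =>
    have hinv := altScan_inv bs
    rw [expand_snoc, ih]
    unfold expand_input_combos_for_dictionary_alt
    rw [altScan_snoc]
    generalize normalize_binary_value b = n
    by_cases hx : n = "X"
    · -- X case: the list doubles
      rw [if_pos hx, if_pos hx]
      simp only [List.length_append, List.length_singleton]
      have hpow : 2 ^ ((altScan bs).2.length + 1) = 2 * 2 ^ (altScan bs).2.length := by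
        rw [pow_succ]; ring
      rw [hpow, range_double_map, List.flatMap_map]
      congr 1
      funext q
      have e0 : (2 * q) >>> 1 = q := by rw [Nat.shiftRight_one]; omega
      have e1 : (2 * q + 1) >>> 1 = q := by rw [Nat.shiftRight_one]; omega
      have a0 : (2 * q) &&& 1 = 0 := by rw [Nat.and_one_is_mod]; omega
      have a1 : (2 * q + 1) &&& 1 = 1 := by rw [Nat.and_one_is_mod]; omega
      rw [altSub_X _ _ _ hinv, altSub_X _ _ _ hinv, e0, e1, a0, a1, join_snoc, join_snoc]
      simp
    · -- fixed case: every string gains one character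
      rw [if_neg hx, if_neg hx]
      simp only [List.flatMap_map]
      have : ∀ i, altSub ((altScan bs).1 ++ [if n = "" then "-" else n])
          (altScan bs).2 (altScan bs).2.length i
          = altSub (altScan bs).1 (altScan bs).2 (altScan bs).2.length i
            ++ [if n = "" then "-" else n] :=
        fun i => altSub_fixed _ _ _ _ _ hinv
      simp only [this, join_snoc]
      exact flatMap_single _ _

-- ===== VERDICT (by name: the statement is the Claim_ definition above) =====
theorem expand_input_combos_for_dictionary_spec : Claim_equal_expand_input_combos_for_dictionary := by
  intro bits _
  unfold Spec_expand_input_combos_for_dictionary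
  exact expand_eq_alt bits
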